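-- pv_equiv track=rewrite | github.com/cyril0369/logistique_msb_project | PlanningStaff.py | _compter_heures_consecutives
-- ===== SOURCE A (Python) =====
-- from typing import List, Dict, Set
--
-- def _compter_heures_consecutives(
--
--     creneaux_staff: List[str],
--     nouveau_creneau: str,
--     tous_creneaux: List[str]
-- ) -> int:
--
--     if not creneaux_staff:
--         return 1
--
--     # Trouver l'index du nouveau créneau
--     try:
--         idx_nouveau = tous_creneaux.index(nouveau_creneau)
--     except ValueError:
--         return 1
--
--     # Compter en arrière
--     consecutives = 1
--     for i in range(idx_nouveau - 1, -1, -1):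
--         if tous_creneaux[i] in creneaux_staff:
--             consecutives += 1
--         else:
--             break
--
--     return consecutives
-- ===== SOURCE B (Python) =====
-- def _compter_heures_consecutives(
--     creneaux_staff,
--     nouveau_creneau,
--     tous_creneaux,
-- ):
--     if not creneaux_staff:
--         return 1
--     try:
--         idx_nouveau = tous_creneaux.index(nouveau_creneau)
--     except ValueError:
--         return 1
--     # forward running streak over the prefix, reset on every miss
--     streak = 0
--     for c in tous_creneaux[:idx_nouveau]:
--         streak = streak + 1 if c in creneaux_staff else 0
--     return streak + 1
-- ===== Notes on version B (the rewrite author's own statement) =====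
-- stated objective: alternative
-- what changed: Replaces the backward scan with an early break by a single forward pass over the prefix that maintains a running streak (reset to 0 on a miss) and returns streak+1.
import Mathlib
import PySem

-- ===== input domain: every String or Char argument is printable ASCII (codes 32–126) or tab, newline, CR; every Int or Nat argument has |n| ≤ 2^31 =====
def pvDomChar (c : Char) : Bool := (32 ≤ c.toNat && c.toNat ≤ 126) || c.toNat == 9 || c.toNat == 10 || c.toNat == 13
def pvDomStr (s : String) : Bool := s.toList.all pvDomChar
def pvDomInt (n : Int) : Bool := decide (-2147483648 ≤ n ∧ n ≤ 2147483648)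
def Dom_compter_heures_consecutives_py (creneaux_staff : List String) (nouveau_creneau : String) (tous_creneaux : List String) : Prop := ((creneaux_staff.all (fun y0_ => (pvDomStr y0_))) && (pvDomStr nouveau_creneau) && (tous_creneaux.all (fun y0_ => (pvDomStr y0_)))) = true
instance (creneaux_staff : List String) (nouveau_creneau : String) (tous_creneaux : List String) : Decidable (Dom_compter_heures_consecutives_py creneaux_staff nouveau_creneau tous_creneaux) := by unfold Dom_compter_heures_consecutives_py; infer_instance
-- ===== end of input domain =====

-- B replaces A's backward scan with an early break by a forward running-streak pass over the
-- prefix (alternative decomposition, same cost); equivalence of the two is proved below.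

-- ===== PORT A =====
-- backward loop 'for i in range(idx-1, -1, -1): … else: break' with accumulator 'consecutives'
def pvLoopA (creneaux_staff tous_creneaux : List String) : List Int → Int → Int
  | [], acc => acc
  | i :: rest, acc =>
    match PySem.List.pyGet? tous_creneaux i with
    | some x => if x ∈ creneaux_staff then pvLoopA creneaux_staff tous_creneaux rest (acc + 1) else acc
    | none => acc  -- unreachable: every i produced by the range is a valid index

def compter_heures_consecutives_py (creneaux_staff : List String) (nouveau_creneau : String) (tous_creneaux : List String) : Int :=
  if creneaux_staff = [] then 1
  else
    match PySem.List.index? tous_creneaux nouveau_creneau with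
    | none => 1  -- ValueError caught: return 1
    | some idx_nouveau =>
      pvLoopA creneaux_staff tous_creneaux (PySem.List.pyRange ((idx_nouveau : Int) - 1) (-1) (-1)) 1

-- ===== PORT B =====
def compter_heures_consecutives_py_alt (creneaux_staff : List String) (nouveau_creneau : String) (tous_creneaux : List String) : Int :=
  if creneaux_staff = [] then 1
  else
    match PySem.List.index? tous_creneaux nouveau_creneau with
    | none => 1
    | some idx_nouveau =>
      (PySem.List.slice tous_creneaux none (some (idx_nouveau : Int))).foldl
        (fun streak c => if c ∈ creneaux_staff then streak + 1 else 0) 0 + 1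

-- ===== PRECONDITION & SPEC =====
def Spec_compter_heures_consecutives_py (creneaux_staff : List String) (nouveau_creneau : String) (tous_creneaux : List String) (out : Int) : Prop := out = compter_heures_consecutives_py_alt creneaux_staff nouveau_creneau tous_creneaux
instance (creneaux_staff : List String) (nouveau_creneau : String) (tous_creneaux : List String) (out : Int) : Decidable (Spec_compter_heures_consecutives_py creneaux_staff nouveau_creneau tous_creneaux out) := by unfold Spec_compter_heures_consecutives_py; infer_instance

-- ===== CLAIM (what is proved, stated in full; the proofs are below) =====
def Claim_equal_compter_heures_consecutives_py : Prop := ∀ (creneaux_staff : List String) (nouveau_creneau : String) (tous_creneaux : List String), Dom_compter_heures_consecutives_py creneaux_staff nouveau_creneau tous_creneaux → Spec_compter_heures_consecutives_py creneaux_staff nouveau_creneau tous_creneaux (compter_heures_consecutives_py creneaux_staff nouveau_creneau tous_creneaux)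

-- ===== LEMMAS AND PROOFS =====

-- A's backward break-loop over indices n-1 … 0 equals acc + B's forward streak over take n.
lemma pvLoopA_eq (cs tc : List String) (n : Nat) (hn : n ≤ tc.length) (acc : Int) :
    pvLoopA cs tc (PySem.List.pyRange ((n : Int) - 1) (-1) (-1)) acc
      = acc + (tc.take n).foldl (fun s c => if c ∈ cs then s + 1 else 0) 0 := by
  induction n generalizing acc with
  | zero =>
    rw [PySem.List.pyRange_neg_one_eq_nil (by norm_num)]
    simp [pvLoopA]
  | succ m ih =>
    have hm : m < tc.length := hn
    have hcons : PySem.List.pyRange ((↑(m + 1) : Int) - 1) (-1) (-1)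
        = (m : Int) :: PySem.List.pyRange ((m : Int) - 1) (-1) (-1) := by
      have := PySem.List.pyRange_neg_one_cons (a := ((↑(m + 1) : Int) - 1)) (b := -1)
        (by push_cast; omega)
      simpa [show ((↑(m + 1) : Int) - 1) = (m : Int) by push_cast; omega] using this
    rw [hcons]
    have hget : PySem.List.pyGet? tc ((m : Int)) = some tc[m] := by
      simp [PySem.List.pyGet?_natCast, List.getElem?_eq_getElem hm]
    have htake : tc.take (m + 1) = tc.take m ++ [tc[m]] := by
      rw [List.take_add_one, List.getElem?_eq_getElem hm]
      rfl
    rw [htake, List.foldl_append]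
    simp only [pvLoopA, hget, List.foldl]
    by_cases hx : tc[m] ∈ cs
    · simp only [hx, if_true]
      rw [ih (le_of_lt hm)]
      ring
    · simp [hx]

-- ===== VERDICT (by name: the statement is the Claim_ definition above) =====
theorem compter_heures_consecutives_py_spec : Claim_equal_compter_heures_consecutives_py := by
  intro cs nc tc _
  unfold Spec_compter_heures_consecutives_py compter_heures_consecutives_py compter_heures_consecutives_py_alt
  by_cases hcs : cs = []
  · simp [hcs]
  · simp only [hcs, if_false]
    cases hidx : PySem.List.index? tc nc with
    | none => rfl
    | some idx =>
      dsimp only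
      obtain ⟨hk, -, -⟩ := PySem.List.getElem_of_index?_eq_some hidx
      rw [PySem.List.slice_to_natCast, pvLoopA_eq cs tc idx (le_of_lt hk) 1]
      ring
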